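-- pv_equiv track=rewrite | github.com/chu6akka/avtoroved | avtoroved-main/analyzer/freq_engine.py | _band_for
-- ===== SOURCE A (Python) =====
-- from typing import Dict, List, Optional, Tuple
--
-- BANDS: Dict[str, dict] = {
--     "nucleus": {
--         "label": "Ядерная (топ 300)",
--         "desc":  "Служебные слова, местоимения, союзы — ранг 1–300",
--         "color": "#89b4fa",
--         "rank_max": 300,
--     },
--     "high": {
--         "label": "Высокочастотная",
--         "desc":  "Общеупотребительная лексика — ранг 301–1 500",
--         "color": "#a6e3a1",
--         "rank_max": 1_500,
--     },
--     "medium": {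
--         "label": "Среднечастотная",
--         "desc":  "Нейтральная книжная лексика — ранг 1 501–7 000",
--         "color": "#f9e2af",
--         "rank_max": 7_000,
--     },
--     "low": {
--         "label": "Низкочастотная",
--         "desc":  "Специальная, редко употребляемая — ранг 7 001–30 000",
--         "color": "#fab387",
--         "rank_max": 30_000,
--     },
--     "rare": {
--         "label": "Раритетная (есть в НКРЯ)",
--         "desc":  "Очень редкая лексика — ранг >30 000",
--         "color": "#f38ba8",
--         "rank_max": 10_000_000,
--     },
--     "absent": {
--         "label": "Отсутствует в НКРЯ",
--         "desc":  "Неологизмы, узкоспециальные термины, авторские слова",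
--         "color": "#cba6f7",
--         "rank_max": None,
--     },
-- }
--
-- def _band_for(rank: int) -> str:
--     if rank == 0:
--         return "absent"
--     for key, meta in BANDS.items():
--         if key == "absent":
--             continue
--         if rank <= meta["rank_max"]:
--             return key
--     return "rare"
-- ===== SOURCE B (Python) =====
-- _THRESHOLDS = [300, 1_500, 7_000, 30_000, 10_000_000]
-- _KEYS = ["nucleus", "high", "medium", "low", "rare"]
--
-- def _bisect_left(a, x):
--     lo, hi = 0, len(a)
--     while lo < hi:
--         mid = (lo + hi) // 2
--         if a[mid] < x:
--             lo = mid + 1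
--         else:
--             hi = mid
--     return lo
--
-- def _band_for(rank: int) -> str:
--     if rank == 0:
--         return "absent"
--     i = _bisect_left(_THRESHOLDS, rank)
--     return _KEYS[i] if i < len(_KEYS) else "rare"
-- ===== Notes on version B (the rewrite author's own statement) =====
-- stated objective: idiomatic
-- what changed: Replaces the linear scan over the BANDS dict with a binary search (hand-rolled bisect_left, since A imports no bisect) into a precomputed sorted threshold array with a parallel key list.
import Mathlib
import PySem

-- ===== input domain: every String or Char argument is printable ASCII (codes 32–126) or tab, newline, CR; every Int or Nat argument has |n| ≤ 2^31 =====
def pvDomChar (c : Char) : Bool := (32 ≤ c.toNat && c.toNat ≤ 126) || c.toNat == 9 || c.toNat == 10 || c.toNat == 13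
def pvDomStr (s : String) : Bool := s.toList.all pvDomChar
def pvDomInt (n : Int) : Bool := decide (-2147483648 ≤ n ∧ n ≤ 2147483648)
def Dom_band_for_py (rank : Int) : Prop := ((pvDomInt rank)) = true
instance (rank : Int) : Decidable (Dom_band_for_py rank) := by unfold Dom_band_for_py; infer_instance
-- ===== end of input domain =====

-- B replaces A's linear scan over the BANDS dict with a binary search into a sorted threshold array (idiomatic table lookup).


-- ===== PORT A =====
-- BANDS in insertion order: (key, rank_max); "absent" carries none (Python None).
def pvBands : List (String × Option Int) :=
  [("nucleus", some 300), ("high", some 1500), ("medium", some 7000),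
   ("low", some 30000), ("rare", some 10000000), ("absent", none)]

-- the for-loop of A; the none branch is unreachable (only "absent" has none, and it is skipped).
def pvBandLoop (rank : Int) : List (String × Option Int) → String
  | [] => "rare"
  | (key, m) :: rest =>
      if key == "absent" then pvBandLoop rank rest
      else match m with
        | some rm => if rank ≤ rm then key else pvBandLoop rank rest
        | none => pvBandLoop rank rest

def band_for_py (rank : Int) : String :=
  if rank == 0 then "absent" else pvBandLoop rank pvBands

-- ===== PORT B =====
def pvThresholds : List Int := [300, 1500, 7000, 30000, 10000000]
def pvKeys : List String := ["nucleus", "high", "medium", "low", "rare"]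

-- Source B's hand-rolled bisect_left (while lo < hi binary search)
def pvBisectLeft (a : List Int) (x : Int) (lo hi : Nat) : Nat :=
  if lo < hi then
    let mid := (lo + hi) / 2
    if a.getD mid 0 < x then pvBisectLeft a x (mid + 1) hi
    else pvBisectLeft a x lo mid
  else lo
termination_by hi - lo

def band_for_py_alt (rank : Int) : String :=
  if rank == 0 then "absent"
  else
    let i := pvBisectLeft pvThresholds rank 0 pvThresholds.length
    if i < pvKeys.length then pvKeys.getD i "" else "rare"

-- ===== PRECONDITION & SPEC =====
def Spec_band_for_py (rank : Int) (out : String) : Prop := out = band_for_py_alt rank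
instance (rank : Int) (out : String) : Decidable (Spec_band_for_py rank out) := by unfold Spec_band_for_py; infer_instance

-- ===== CLAIM (what is proved, stated in full; the proofs are below) =====
def Claim_equal_band_for_py : Prop := ∀ (rank : Int), Dom_band_for_py rank → Spec_band_for_py rank (band_for_py rank)

-- ===== LEMMAS AND PROOFS =====

-- ===== VERDICT (by name: the statement is the Claim_ definition above) =====
theorem band_for_py_spec : Claim_equal_band_for_py := by
  intro rank _
  unfold Spec_band_for_py band_for_py band_for_py_alt
  by_cases h0 : rank = 0
  · simp [h0]
  · simp only [beq_iff_eq, h0, if_false]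
    by_cases h1 : rank ≤ 300
    · have c1 : ¬((7000:Int) < rank) := by omega
      have c2 : ¬((1500:Int) < rank) := by omega
      have c3 : ¬((300:Int) < rank) := by omega
      simp [pvBands, pvBandLoop, pvThresholds, pvKeys, pvBisectLeft, h1, c1, c2, c3]
    · by_cases h2 : rank ≤ 1500
      · have c1 : ¬((7000:Int) < rank) := by omega
        have c2 : ¬((1500:Int) < rank) := by omega
        have c3 : ((300:Int) < rank) := by omega
        simp [pvBands, pvBandLoop, pvThresholds, pvKeys, pvBisectLeft, h1, h2, c1, c2, c3]
      · by_cases h3 : rank ≤ 7000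
        · have c1 : ¬((7000:Int) < rank) := by omega
          have c2 : ((1500:Int) < rank) := by omega
          simp [pvBands, pvBandLoop, pvThresholds, pvKeys, pvBisectLeft, h1, h2, h3, c1, c2]
        · by_cases h4 : rank ≤ 30000
          · have c1 : ((7000:Int) < rank) := by omega
            have c2 : ¬((10000000:Int) < rank) := by omega
            have c3 : ¬((30000:Int) < rank) := by omega
            simp [pvBands, pvBandLoop, pvThresholds, pvKeys, pvBisectLeft, h1, h2, h3, h4, c1, c2, c3]
          · by_cases h5 : rank ≤ 10000000
            · have c1 : ((7000:Int) < rank) := by omega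
              have c2 : ¬((10000000:Int) < rank) := by omega
              have c3 : ((30000:Int) < rank) := by omega
              simp [pvBands, pvBandLoop, pvThresholds, pvKeys, pvBisectLeft, h1, h2, h3, h4, h5, c1, c2, c3]
            · have c1 : ((7000:Int) < rank) := by omega
              have c2 : ((10000000:Int) < rank) := by omega
              simp [pvBands, pvBandLoop, pvThresholds, pvKeys, pvBisectLeft, h1, h2, h3, h4, h5, c1, c2]
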